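-- pv_equiv track=rewrite | github.com/aviswerdlow/k4 | 04_EXPERIMENTS/phase3_zone/key_fit/fit_plans_lmn_extended.py | apply_custom_ring
-- ===== SOURCE A (Python) =====
-- from typing import Dict, Any, List, Tuple, Optional
--
-- def apply_custom_ring(text: str, ring_order: List[int]) -> str:
--     """Apply custom ring permutation based on anchor-derived order"""
--     n = len(text)
--     result = [''] * n
--
--     # Apply ring permutation
--     for i in range(n):
--         # Map position i to new position based on ring_order
--         new_pos = ring_order[i % 24] + (i // 24) * 24
--         if new_pos < n:
--             result[new_pos] = text[i]
--
--     # Fill any gaps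
--     for i in range(n):
--         if result[i] == '':
--             result[i] = text[i]
--
--     return ''.join(result)
-- ===== SOURCE B (Python) =====
-- def apply_custom_ring(text, ring_order):
--     """Apply custom ring permutation based on anchor-derived order"""
--     n = len(text)
--     # Pair every source position with its ring target, sort by (target, source),
--     # then merge against output positions 0..n-1 with a single advancing cursor:
--     # a position several sources target keeps the highest source, a position no
--     # source targets keeps its own character.
--     pairs = sorted((ring_order[i % 24] + (i // 24) * 24, i) for i in range(n))
--     out = []
--     k = 0
--     for j in range(n):
--         src = j
--         while k < len(pairs) and pairs[k][0] <= j: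
--             if pairs[k][0] == j:
--                 src = pairs[k][1]
--             k += 1
--         out.append(text[src])
--     return ''.join(out)
-- ===== Notes on version B (the rewrite author's own statement) =====
-- stated objective: alternative
-- what changed: Replaces A's scatter-into-a-sentinel-array plus gap-filling second pass by sort-then-merge: every source position is paired with its ring target, the pairs are sorted by (target, source), and one merging sweep over output positions with an advancing cursor picks each position's character; …
-- outside the precondition, e.g. on apply_custom_ring('ab', [-1, 0]): A returns 'ba', B returns 'bb'; on apply_custom_ring('abcd', [-2, 1, 2, 3]): A returns 'abcd', B returns 'abcd'
import Mathlib
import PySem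

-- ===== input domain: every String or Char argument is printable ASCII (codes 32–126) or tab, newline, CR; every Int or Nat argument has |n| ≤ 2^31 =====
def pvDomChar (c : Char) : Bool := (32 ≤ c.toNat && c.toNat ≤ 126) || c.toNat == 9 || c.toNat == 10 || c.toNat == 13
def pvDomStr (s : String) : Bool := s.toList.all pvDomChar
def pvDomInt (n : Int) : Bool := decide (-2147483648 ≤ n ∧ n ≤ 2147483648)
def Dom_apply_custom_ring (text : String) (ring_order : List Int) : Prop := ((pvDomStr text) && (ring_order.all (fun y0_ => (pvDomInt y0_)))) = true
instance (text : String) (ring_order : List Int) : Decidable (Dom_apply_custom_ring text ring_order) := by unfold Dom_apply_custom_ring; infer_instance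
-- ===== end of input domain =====

-- B replaces A's scatter-into-a-sentinel-array plus gap-filling second pass by sort-then-merge
-- (pair sources with targets, sort by (target, source), one merging sweep over output positions):
-- an alternative algorithm of similar cost.

-- ===== PORT A =====
def apply_custom_ring (text : String) (ring_order : List Int) : String :=
  let cs := text.toList
  let n : Int := cs.length
  -- result = [''] * n;  '' ↦ [], a one-char string ↦ [c]
  let result :=
    (PySem.List.pyRange 0 n 1).foldl
      (fun result i =>
        let new_pos := PySem.List.pyGetD ring_order (PySem.Int.mod i 24) 0 + PySem.Int.floordiv i 24 * 24
        if new_pos < n then PySem.List.pySetD result new_pos [PySem.List.pyGetD cs i ' '] else result)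
      (List.replicate cs.length ([] : List Char))
  let result :=
    (PySem.List.pyRange 0 n 1).foldl
      (fun result i =>
        if PySem.List.pyGetD result i [] = [] then PySem.List.pySetD result i [PySem.List.pyGetD cs i ' '] else result)
      result
  String.mk result.flatten

-- ===== PORT B =====
-- B-side helper: the inner `while k < len(pairs) and pairs[k][0] <= j` cursor loop,
-- ported over the remaining suffix of the sorted pair list; returns (src, remaining suffix).
def pvMerge (j : Int) : List (Int × Int) → Int → Int × List (Int × Int)
  | [], src => (src, [])
  | (t, i) :: rest, src =>
    if t ≤ j then pvMerge j rest (if t = j then i else src) else (src, (t, i) :: rest)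

def apply_custom_ring_alt (text : String) (ring_order : List Int) : String :=
  let cs := text.toList
  let n : Int := cs.length
  let pairs := PySem.List.sorted2
      ((PySem.List.pyRange 0 n 1).map (fun i =>
        (PySem.List.pyGetD ring_order (PySem.Int.mod i 24) 0 + PySem.Int.floordiv i 24 * 24, i)))
      (fun p => p.1) (fun p => p.2)
  let st := (PySem.List.pyRange 0 n 1).foldl
      (fun (st : List Char × List (Int × Int)) j =>
        let r := pvMerge j st.2 j
        (st.1 ++ [PySem.List.pyGetD cs r.1 ' '], r.2))
      (([] : List Char), pairs)
  String.mk st.1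

-- ===== PRECONDITION & SPEC =====
-- Pre_ restricts to the function's natural domain: a ring_order long enough for every read and whose
-- read entries are nonnegative ring positions — A raises IndexError when ring_order is shorter than
-- min(len(text),24) or an entry is below -len(text), and on an entry in [-len(text),0) A's list write
-- wraps to the end of the text (a Python negative-indexing artefact) that B does not reproduce.
def Pre_apply_custom_ring (text : String) (ring_order : List Int) : Prop :=
  min text.toList.length 24 ≤ ring_order.length ∧
  ∀ r : Nat, r < min text.toList.length 24 → 0 ≤ ring_order.getD r 0
instance (text : String) (ring_order : List Int) : Decidable (Pre_apply_custom_ring text ring_order) := by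
  unfold Pre_apply_custom_ring; infer_instance

def pvWitness_apply_custom_ring : String × List Int := ("KRYPTOS", [3, 0, 2, 5, 1, 4, 6])

def Spec_apply_custom_ring (text : String) (ring_order : List Int) (out : String) : Prop := out = apply_custom_ring_alt text ring_order
instance (text : String) (ring_order : List Int) (out : String) : Decidable (Spec_apply_custom_ring text ring_order out) := by unfold Spec_apply_custom_ring; infer_instance

-- ===== CLAIM (what is proved, stated in full; the proofs are below) =====
def Claim_equal_apply_custom_ring : Prop := ∀ (text : String) (ring_order : List Int), Dom_apply_custom_ring text ring_order → Pre_apply_custom_ring text ring_order → Spec_apply_custom_ring text ring_order (apply_custom_ring text ring_order)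


-- ===== LEMMAS AND PROOFS =====

-- The lexicographic strict order Python's tuple sort uses on our (target, source) pairs.
def pvLexLt (a b : Int × Int) : Prop := a.1 < b.1 ∨ (a.1 = b.1 ∧ a.2 < b.2)

-- φ(t,i) = t*n + i is an order embedding of the lexicographic order when 0 ≤ i,k < n.
lemma phi_lt_iff (t u i k n : Int) (hi : 0 ≤ i) (hin : i < n) (hk : 0 ≤ k) (hkn : k < n) :
    t * n + i < u * n + k ↔ (t < u ∨ (t = u ∧ i < k)) := by
  constructor
  · intro h
    rcases lt_trichotomy t u with h1 | h1 | h1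
    · exact Or.inl h1
    · subst h1; exact Or.inr ⟨rfl, by omega⟩
    · exfalso
      have h2 : (u + 1) * n ≤ t * n :=
        mul_le_mul_of_nonneg_right (by omega) (by omega)
      nlinarith
  · rintro (h | ⟨h1, h2⟩)
    · have h2 : (t + 1) * n ≤ u * n :=
        mul_le_mul_of_nonneg_right (by omega) (by omega)
      nlinarith
    · subst h1; omega

lemma flatten_map_singleton {α β : Type} (l : List α) (f : α → β) :
    (l.map (fun x => [f x])).flatten = l.map f := by
  induction l with
  | nil => simp
  | cons a l ih => simp [ih]

-- insertBy only inspects `before` on the inserted element against list members.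
lemma insertBy_congr {α : Type} (b1 b2 : α → α → Bool) (x : α) :
    ∀ ys : List α, (∀ y ∈ ys, b1 x y = b2 x y) →
      PySem.List.insertBy b1 x ys = PySem.List.insertBy b2 x ys := by
  intro ys
  induction ys with
  | nil => intro _; rfl
  | cons y ys ih =>
    intro h
    have hy := h y (by simp)
    simp only [PySem.List.insertBy, hy]
    split
    · rfl
    · rw [ih (fun z hz => h z (by simp [hz]))]

lemma foldl_insertBy_congr {α : Type} (b1 b2 : α → α → Bool) (L : List α)
    (h : ∀ a b : α, a ∈ L → b ∈ L → b1 a b = b2 a b) :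
    ∀ (xs acc : List α), (∀ x ∈ xs, x ∈ L) → (∀ y ∈ acc, y ∈ L) →
      xs.foldl (fun acc x => PySem.List.insertBy b1 x acc) acc =
      xs.foldl (fun acc x => PySem.List.insertBy b2 x acc) acc := by
  intro xs
  induction xs with
  | nil => intro _ _ _; rfl
  | cons x xs ih =>
    intro acc hxs hacc
    have hx : x ∈ L := hxs x (by simp)
    simp only [List.foldl_cons]
    rw [insertBy_congr b1 b2 x acc (fun y hy => h x y hx (hacc y hy))]
    exact ih _ (fun z hz => hxs z (by simp [hz]))
      (fun y hy => ((PySem.List.mem_insertBy _ x y acc).mp hy).elim (fun e => e ▸ hx) (hacc y))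

-- the cursor loop: on a lexicographically sorted suffix it realises
-- "last pair with key j wins, everything with key ≤ j is consumed".
lemma pvMerge_spec (j : Int) :
    ∀ (rest : List (Int × Int)) (src : Int), rest.Pairwise pvLexLt →
      pvMerge j rest src =
        (rest.foldl (fun s p => if p.1 = j then p.2 else s) src,
         rest.filter (fun p => decide (j < p.1))) := by
  intro rest
  induction rest with
  | nil => intro src _; rfl
  | cons p rest ih =>
    rcases p with ⟨t, i⟩
    intro src hpw
    rw [List.pairwise_cons] at hpw
    obtain ⟨hhead, hrest⟩ := hpw
    by_cases ht : t ≤ j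
    · simp only [pvMerge, if_pos ht, List.foldl_cons, List.filter_cons,
        decide_eq_true_eq]
      rw [if_neg (by omega : ¬ j < t)]
      exact ih _ hrest
    · simp only [pvMerge, if_neg ht, List.foldl_cons, List.filter_cons,
        decide_eq_true_eq]
      rw [if_neg (by omega : ¬ t = j), if_pos (by omega : j < t)]
      have hnon : rest.foldl (fun s p => if p.1 = j then p.2 else s) src = src := by
        rw [PySem.List.foldl_ite_eq_foldl_filter (p := fun p : Int × Int => p.1 = j)
          (fun s p => p.2)]
        rw [List.filter_eq_nil_iff.mpr (fun p hp => by
          have := hhead p hp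
          simp only [decide_eq_true_eq]
          rcases this with h | ⟨h, _⟩ <;> omega)]
        rfl
      rw [hnon, List.filter_eq_self.mpr (fun p hp => by
        have := hhead p hp
        simp only [decide_eq_true_eq]
        rcases this with h | ⟨h, _⟩ <;> omega)]

-- last-element folds: Option-valued and plain-valued agree.
lemma foldl_const_some : ∀ (l : List Int) (a : Int),
    l.foldl (fun _ i => some i) (some a) = some (l.foldl (fun _ i => i) a) := by
  intro l
  induction l with
  | nil => intro a; rfl
  | cons b l ih => intro a; simpa using ih b

lemma opt_bridge (l : List Int) (d : Int) :
    l.foldl (fun _ i => i) d =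
      (l.foldl (fun (_ : Option Int) i => some i) none).elim d id := by
  cases l with
  | nil => rfl
  | cons a t => simp [foldl_const_some t a]

-- the fill-gaps loop, characterised elementwise
lemma fill_inv (cs : List Char) (xs : List (List Char)) (hlen : xs.length = cs.length)
    (k : Nat) (hk : k ≤ cs.length) :
    ((PySem.List.pyRange 0 (k : Int) 1).foldl
      (fun result i =>
        if PySem.List.pyGetD result i [] = [] then PySem.List.pySetD result i [PySem.List.pyGetD cs i ' '] else result)
      xs).length = cs.length ∧
    ∀ j : Nat, j < cs.length →
      ((PySem.List.pyRange 0 (k : Int) 1).foldl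
        (fun result i =>
          if PySem.List.pyGetD result i [] = [] then PySem.List.pySetD result i [PySem.List.pyGetD cs i ' '] else result)
        xs)[j]? =
      if j < k then some (if xs[j]?.getD [] = [] then [PySem.List.pyGetD cs (j : Int) ' '] else xs[j]?.getD []) else xs[j]?
      := by
  induction k with
  | zero =>
    simp only [Nat.cast_zero, PySem.List.pyRange_one_eq_nil (le_refl (0 : Int)), List.foldl_nil]
    exact ⟨hlen, fun j hj => by simp⟩
  | succ k ih =>
    have hkn : k < cs.length := by omega
    obtain ⟨ih1, ih2⟩ := ih (by omega)
    have hsplit : PySem.List.pyRange 0 ((k + 1 : Nat) : Int) 1 =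
        PySem.List.pyRange 0 (k : Int) 1 ++ [(k : Int)] := by
      push_cast
      exact PySem.List.pyRange_one_succ_right (by positivity)
    rw [hsplit]
    simp only [List.foldl_append, List.foldl_cons, List.foldl_nil]
    have hrk := ih2 k hkn
    rw [if_neg (by omega : ¬ k < k)] at hrk
    have hread : PySem.List.pyGetD
        ((PySem.List.pyRange 0 (k : Int) 1).foldl
          (fun result i =>
            if PySem.List.pyGetD result i [] = [] then PySem.List.pySetD result i [PySem.List.pyGetD cs i ' '] else result)
          xs) ((k : Nat) : Int) [] = xs[k]?.getD [] := by
      rw [PySem.List.pyGetD_natCast, List.getD_eq_getElem?_getD, hrk]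
    rw [hread]
    by_cases hempty : xs[k]?.getD [] = ([] : List Char)
    · rw [if_pos hempty, PySem.List.pySetD_natCast]
      refine ⟨by rw [List.length_set]; exact ih1, ?_⟩
      intro j hj
      rw [List.getElem?_set]
      rcases eq_or_ne k j with h | h
      · subst h
        rw [if_pos rfl, ih1, if_pos hkn, if_pos (by omega : k < k + 1), if_pos hempty]
      · rw [if_neg h, ih2 j hj]
        by_cases hjk : j < k
        · rw [if_pos hjk, if_pos (by omega : j < k + 1)]
        · rw [if_neg hjk, if_neg (by omega : ¬ j < k + 1)]
    · rw [if_neg hempty]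
      refine ⟨ih1, ?_⟩
      intro j hj
      rcases eq_or_ne j k with h | h
      · subst h
        rw [hrk, if_pos (by omega : j < j + 1), if_neg hempty]
        obtain ⟨a, ha⟩ : ∃ a, xs[j]? = some a := ⟨_, List.getElem?_eq_getElem (by omega)⟩
        rw [ha]
        simp
      · rw [ih2 j hj]
        by_cases hjk : j < k
        · rw [if_pos hjk, if_pos (by omega : j < k + 1)]
        · rw [if_neg hjk, if_neg (by omega : ¬ j < k + 1)]

-- A's scatter loop, characterised elementwise against the "last source with this target" fold
lemma scatter_inv (cs : List Char) (ring_order : List Int)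
    (hnn : ∀ i : Int, 0 ≤ i → i < (cs.length : Int) →
      0 ≤ PySem.List.pyGetD ring_order (PySem.Int.mod i 24) 0 + PySem.Int.floordiv i 24 * 24)
    (k : Nat) (hk : k ≤ cs.length) :
    ((PySem.List.pyRange 0 (k : Int) 1).foldl
      (fun result i =>
        let new_pos := PySem.List.pyGetD ring_order (PySem.Int.mod i 24) 0 + PySem.Int.floordiv i 24 * 24
        if new_pos < (cs.length : Int) then PySem.List.pySetD result new_pos [PySem.List.pyGetD cs i ' '] else result)
      (List.replicate cs.length ([] : List Char))).length = cs.length ∧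
    ∀ j : Nat, j < cs.length →
      ((PySem.List.pyRange 0 (k : Int) 1).foldl
        (fun result i =>
          let new_pos := PySem.List.pyGetD ring_order (PySem.Int.mod i 24) 0 + PySem.Int.floordiv i 24 * 24
          if new_pos < (cs.length : Int) then PySem.List.pySetD result new_pos [PySem.List.pyGetD cs i ' '] else result)
        (List.replicate cs.length ([] : List Char)))[j]? =
      some (match (PySem.List.pyRange 0 (k : Int) 1).foldl
          (fun (a : Option Int) i =>
            if PySem.List.pyGetD ring_order (PySem.Int.mod i 24) 0 + PySem.Int.floordiv i 24 * 24 = (j : Int)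
            then some i else a) none with
        | some i => [PySem.List.pyGetD cs i ' ']
        | none => ([] : List Char)) := by
  induction k with
  | zero =>
    simp only [Nat.cast_zero, PySem.List.pyRange_one_eq_nil (le_refl (0 : Int)), List.foldl_nil]
    exact ⟨by simp, fun j hj => by simp [hj]⟩
  | succ k ih =>
    have hkn : k < cs.length := by omega
    obtain ⟨ih1, ih2⟩ := ih (by omega)
    have hsplit : PySem.List.pyRange 0 ((k + 1 : Nat) : Int) 1 =
        PySem.List.pyRange 0 (k : Int) 1 ++ [(k : Int)] := by
      push_cast
      exact PySem.List.pyRange_one_succ_right (by positivity)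
    rw [hsplit]
    simp only [List.foldl_append, List.foldl_cons, List.foldl_nil]
    set np := PySem.List.pyGetD ring_order (PySem.Int.mod ((k : Nat) : Int) 24) 0 +
      PySem.Int.floordiv ((k : Nat) : Int) 24 * 24 with hnp
    have hnp0 : 0 ≤ np := hnn ((k : Nat) : Int) (by positivity) (by exact_mod_cast hkn)
    by_cases hcase : np < (cs.length : Int)
    · simp only [if_pos hcase]
      rw [PySem.List.pySetD_of_nonneg _ _ hnp0]
      refine ⟨by rw [List.length_set]; exact ih1, ?_⟩
      intro j hj
      rw [List.getElem?_set, ih1]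
      rcases eq_or_ne np.toNat j with h | h
      · rw [if_pos h, if_pos (by omega : np.toNat < cs.length),
          if_pos (by omega : np = (j : Int))]
      · rw [if_neg h, if_neg (by omega : ¬ np = (j : Int))]
        exact ih2 j hj
    · simp only [if_neg hcase]
      refine ⟨ih1, ?_⟩
      intro j hj
      rw [if_neg (by omega : ¬ np = (j : Int))]
      exact ih2 j hj

-- the "last source position whose target is j" fold, the common elementwise spec of both programs
def pvHit (ring_order : List Int) (n : Int) (j : Int) : Option Int :=
  (PySem.List.pyRange 0 n 1).foldl
    (fun (a : Option Int) i =>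
      if PySem.List.pyGetD ring_order (PySem.Int.mod i 24) 0 + PySem.Int.floordiv i 24 * 24 = j
      then some i else a) none

def pvOut (cs : List Char) (ring_order : List Int) : List Char :=
  (List.range cs.length).map (fun (j : Nat) =>
    PySem.List.pyGetD cs ((pvHit ring_order (cs.length : Int) (j : Int)).elim ((j : Int)) id) ' ')

-- A's program (both passes), elementwise
lemma a_eval (cs : List Char) (ring_order : List Int)
    (hnn : ∀ i : Int, 0 ≤ i → i < (cs.length : Int) →
      0 ≤ PySem.List.pyGetD ring_order (PySem.Int.mod i 24) 0 + PySem.Int.floordiv i 24 * 24) :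
    ((PySem.List.pyRange 0 (cs.length : Int) 1).foldl
      (fun result i =>
        if PySem.List.pyGetD result i [] = [] then PySem.List.pySetD result i [PySem.List.pyGetD cs i ' '] else result)
      ((PySem.List.pyRange 0 (cs.length : Int) 1).foldl
        (fun result i =>
          let new_pos := PySem.List.pyGetD ring_order (PySem.Int.mod i 24) 0 + PySem.Int.floordiv i 24 * 24
          if new_pos < (cs.length : Int) then PySem.List.pySetD result new_pos [PySem.List.pyGetD cs i ' '] else result)
        (List.replicate cs.length ([] : List Char)))).flatten = pvOut cs ring_order := by
  obtain ⟨s1, s2⟩ := scatter_inv cs ring_order hnn cs.length le_rfl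
  obtain ⟨f1, f2⟩ := fill_inv cs _ s1 cs.length le_rfl
  have hF : ((PySem.List.pyRange 0 (cs.length : Int) 1).foldl
      (fun result i =>
        if PySem.List.pyGetD result i [] = [] then PySem.List.pySetD result i [PySem.List.pyGetD cs i ' '] else result)
      ((PySem.List.pyRange 0 (cs.length : Int) 1).foldl
        (fun result i =>
          let new_pos := PySem.List.pyGetD ring_order (PySem.Int.mod i 24) 0 + PySem.Int.floordiv i 24 * 24
          if new_pos < (cs.length : Int) then PySem.List.pySetD result new_pos [PySem.List.pyGetD cs i ' '] else result)
        (List.replicate cs.length ([] : List Char)))) =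
      (List.range cs.length).map (fun j : Nat =>
        [PySem.List.pyGetD cs ((pvHit ring_order (cs.length : Int) (j : Int)).elim (j : Int) id) ' ']) := by
    apply List.ext_getElem?
    intro j
    by_cases hj : j < cs.length
    · rw [f2 j hj, if_pos hj, s2 j hj, List.getElem?_map, List.getElem?_range hj,
        Option.map_some]
      cases hB : pvHit ring_order (cs.length : Int) (j : Int) with
      | none =>
        unfold pvHit at hB
        rw [hB]
        simp
      | some i =>
        unfold pvHit at hB
        rw [hB]
        simp
    · rw [List.getElem?_eq_none (by rw [f1]; omega),
        List.getElem?_eq_none (by simp only [List.length_map, List.length_range]; omega)]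
  rw [hF, flatten_map_singleton]
  unfold pvOut
  rfl

-- ---- B-side facts ----

-- the tuple-sort comparator agrees with the single key φ(t,i) = t*n + i on in-range pairs
lemma before_eq (a b : Int × Int) (n : Int)
    (ha : 0 ≤ a.2 ∧ a.2 < n) (hb : 0 ≤ b.2 ∧ b.2 < n) :
    (decide (a.1 < b.1) || (!decide (b.1 < a.1) && decide (a.2 < b.2))) =
      decide (a.1 * n + a.2 < b.1 * n + b.2) := by
  have h := phi_lt_iff a.1 b.1 a.2 b.2 n ha.1 ha.2 hb.1 hb.2
  by_cases h1 : a.1 < b.1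
  · simp [h1, h.mpr (Or.inl h1)]
  · by_cases h2 : b.1 < a.1
    · have : ¬ (a.1 * n + a.2 < b.1 * n + b.2) := fun hc => by
        rcases h.mp hc with h3 | ⟨h3, _⟩ <;> omega
      simp [h1, h2, this]
    · have he : a.1 = b.1 := le_antisymm (by omega) (by omega)
      by_cases h3 : a.2 < b.2
      · simp [h1, h2, h3, h.mpr (Or.inr ⟨he, h3⟩)]
      · have : ¬ (a.1 * n + a.2 < b.1 * n + b.2) := fun hc => by
          rcases h.mp hc with h4 | ⟨h4, h5⟩ <;> omega
        simp [h1, h2, h3, this]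

lemma mem_pairs0 (cs : List Char) (ring_order : List Int) (p : Int × Int)
    (hp : p ∈ (PySem.List.pyRange 0 (cs.length : Int) 1).map (fun i =>
      (PySem.List.pyGetD ring_order (PySem.Int.mod i 24) 0 + PySem.Int.floordiv i 24 * 24, i))) :
    0 ≤ p.2 ∧ p.2 < (cs.length : Int) ∧
      p.1 = PySem.List.pyGetD ring_order (PySem.Int.mod p.2 24) 0 + PySem.Int.floordiv p.2 24 * 24 := by
  obtain ⟨i, hi, rfl⟩ := List.mem_map.mp hp
  have := PySem.List.mem_pyRange_one.mp hi
  exact ⟨this.1, this.2, rfl⟩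

lemma pairs0_pairwise_snd (cs : List Char) (ring_order : List Int) :
    ((PySem.List.pyRange 0 (cs.length : Int) 1).map (fun i =>
      (PySem.List.pyGetD ring_order (PySem.Int.mod i 24) 0 + PySem.Int.floordiv i 24 * 24, i))).Pairwise
      (fun a b => a.2 < b.2) := by
  rw [PySem.List.pyRange_zero_natCast, List.map_map]
  exact List.pairwise_lt_range.map _ (fun a b h => by
    simp only [Function.comp_apply]
    exact_mod_cast h)

-- the sorted pair list is pairwise strictly lexicographic
lemma sorted_pairs_lex (cs : List Char) (ring_order : List Int) :
    (PySem.List.sorted2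
      ((PySem.List.pyRange 0 (cs.length : Int) 1).map (fun i =>
        (PySem.List.pyGetD ring_order (PySem.Int.mod i 24) 0 + PySem.Int.floordiv i 24 * 24, i)))
      (fun p => p.1) (fun p => p.2)).Pairwise pvLexLt := by
  set pairs0 := (PySem.List.pyRange 0 (cs.length : Int) 1).map (fun i =>
    (PySem.List.pyGetD ring_order (PySem.Int.mod i 24) 0 + PySem.Int.floordiv i 24 * 24, i)) with hp0
  have hperm : (PySem.List.sorted2 pairs0 (fun p => p.1) (fun p => p.2)).Perm pairs0 :=
    PySem.List.sorted2_perm pairs0 _ _ false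
  have heq : PySem.List.sorted2 pairs0 (fun p => p.1) (fun p => p.2) =
      PySem.List.sorted pairs0 (fun p => p.1 * (cs.length : Int) + p.2) := by
    simp only [PySem.List.sorted2, PySem.List.sorted, if_neg (by decide : ¬ (false = true))]
    exact foldl_insertBy_congr _ _ pairs0
      (fun a b ha hb => before_eq a b (cs.length : Int)
        ⟨(mem_pairs0 cs ring_order a ha).1, (mem_pairs0 cs ring_order a ha).2.1⟩
        ⟨(mem_pairs0 cs ring_order b hb).1, (mem_pairs0 cs ring_order b hb).2.1⟩)
      pairs0 [] (fun x hx => hx) (fun y hy => absurd hy (List.not_mem_nil))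
  have hnodup : (PySem.List.sorted2 pairs0 (fun p => p.1) (fun p => p.2)).Nodup := by
    refine hperm.symm.nodup ?_
    rw [List.nodup_iff_pairwise_ne]
    exact (pairs0_pairwise_snd cs ring_order).imp (fun h hc => by rw [hc] at h; omega)
  have hle : (PySem.List.sorted2 pairs0 (fun p => p.1) (fun p => p.2)).Pairwise
      (fun a b => a.1 * (cs.length : Int) + a.2 ≤ b.1 * (cs.length : Int) + b.2) := by
    rw [heq]
    exact PySem.List.sorted_pairwise pairs0 _
  refine ((hle.and (List.nodup_iff_pairwise_ne.mp hnodup)).imp_of_mem ?_)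
  intro a b ha hb hab
  obtain ⟨hle', hne⟩ := hab
  have haa := mem_pairs0 cs ring_order a (hperm.subset ha)
  have hbb := mem_pairs0 cs ring_order b (hperm.subset hb)
  have hphi := phi_lt_iff a.1 b.1 a.2 b.2 (cs.length : Int) haa.1 haa.2.1 hbb.1 hbb.2.1
  have hphi' := phi_lt_iff b.1 a.1 b.2 a.2 (cs.length : Int) hbb.1 hbb.2.1 haa.1 haa.2.1
  rcases lt_trichotomy a.1 b.1 with h | h | h
  · exact Or.inl h
  · rcases lt_trichotomy a.2 b.2 with h2 | h2 | h2
    · exact Or.inr ⟨h, h2⟩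
    · exact absurd (Prod.ext h h2) hne
    · exact absurd (hphi'.mpr (Or.inr ⟨h.symm, h2⟩)) (by omega)
  · exact absurd (hphi'.mpr (Or.inl h)) (by omega)

-- among pairs with target exactly k, the sorted list and the construction order agree
lemma filter_key_eq (cs : List Char) (ring_order : List Int) (k : Int) :
    (PySem.List.sorted2
      ((PySem.List.pyRange 0 (cs.length : Int) 1).map (fun i =>
        (PySem.List.pyGetD ring_order (PySem.Int.mod i 24) 0 + PySem.Int.floordiv i 24 * 24, i)))
      (fun p => p.1) (fun p => p.2)).filter (fun p => decide (p.1 = k)) =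
    ((PySem.List.pyRange 0 (cs.length : Int) 1).map (fun i =>
      (PySem.List.pyGetD ring_order (PySem.Int.mod i 24) 0 + PySem.Int.floordiv i 24 * 24, i))).filter
      (fun p => decide (p.1 = k)) := by
  apply List.Perm.eq_of_pairwise (le := fun a b : Int × Int => a.2 < b.2)
  · intro a b _ _ h1 h2
    exact absurd (lt_trans h1 h2) (lt_irrefl _)
  · exact ((sorted_pairs_lex cs ring_order).filter _).imp_of_mem (fun ha hb hab => by
      have h1 := of_decide_eq_true (List.mem_filter.mp ha).2
      have h2 := of_decide_eq_true (List.mem_filter.mp hb).2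
      rcases hab with h | ⟨_, h⟩
      · omega
      · exact h)
  · exact (pairs0_pairwise_snd cs ring_order).filter _
  · exact (PySem.List.sorted2_perm _ _ _ false).filter _

-- the per-position source the merging sweep computes
lemma sel_eq (cs : List Char) (ring_order : List Int) (k : Nat) :
    ((PySem.List.sorted2
        ((PySem.List.pyRange 0 (cs.length : Int) 1).map (fun i =>
          (PySem.List.pyGetD ring_order (PySem.Int.mod i 24) 0 + PySem.Int.floordiv i 24 * 24, i)))
        (fun p => p.1) (fun p => p.2)).filter (fun p => decide ((k : Int) ≤ p.1))).foldl
      (fun s p => if p.1 = (k : Int) then p.2 else s) (k : Int) =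
    (pvHit ring_order (cs.length : Int) (k : Int)).elim (k : Int) id := by
  rw [PySem.List.foldl_ite_eq_foldl_filter (p := fun p : Int × Int => p.1 = (k : Int))
    (fun s p => p.2), List.filter_filter]
  rw [List.filter_congr (q := fun p : Int × Int => decide (p.1 = (k : Int)))
    (fun p _ => by by_cases h : p.1 = (k : Int) <;> simp [h])]
  rw [filter_key_eq cs ring_order (k : Int), List.filter_map, List.foldl_map]
  unfold pvHit
  rw [PySem.List.foldl_ite_eq_foldl_filter
    (p := fun i : Int => PySem.List.pyGetD ring_order (PySem.Int.mod i 24) 0 + PySem.Int.floordiv i 24 * 24 = (k : Int))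
    (fun (a : Option Int) i => some i)]
  exact opt_bridge _ _

-- the merging sweep, characterised after k output positions
lemma merge_inv (cs : List Char) (ring_order : List Int)
    (hnn : ∀ i : Int, 0 ≤ i → i < (cs.length : Int) →
      0 ≤ PySem.List.pyGetD ring_order (PySem.Int.mod i 24) 0 + PySem.Int.floordiv i 24 * 24)
    (k : Nat) (hk : k ≤ cs.length) :
    (PySem.List.pyRange 0 (k : Int) 1).foldl
      (fun (st : List Char × List (Int × Int)) j =>
        let r := pvMerge j st.2 j
        (st.1 ++ [PySem.List.pyGetD cs r.1 ' '], r.2))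
      (([] : List Char),
        PySem.List.sorted2
          ((PySem.List.pyRange 0 (cs.length : Int) 1).map (fun i =>
            (PySem.List.pyGetD ring_order (PySem.Int.mod i 24) 0 + PySem.Int.floordiv i 24 * 24, i)))
          (fun p => p.1) (fun p => p.2)) =
    ((List.range k).map (fun (j : Nat) =>
        PySem.List.pyGetD cs ((pvHit ring_order (cs.length : Int) (j : Int)).elim ((j : Int)) id) ' '),
      (PySem.List.sorted2
        ((PySem.List.pyRange 0 (cs.length : Int) 1).map (fun i =>
          (PySem.List.pyGetD ring_order (PySem.Int.mod i 24) 0 + PySem.Int.floordiv i 24 * 24, i)))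
        (fun p => p.1) (fun p => p.2)).filter (fun p => decide ((k : Int) ≤ p.1))) := by
  set S := PySem.List.sorted2
      ((PySem.List.pyRange 0 (cs.length : Int) 1).map (fun i =>
        (PySem.List.pyGetD ring_order (PySem.Int.mod i 24) 0 + PySem.Int.floordiv i 24 * 24, i)))
      (fun p => p.1) (fun p => p.2) with hS
  induction k with
  | zero =>
    simp only [Nat.cast_zero, PySem.List.pyRange_one_eq_nil (le_refl (0 : Int)), List.foldl_nil,
      List.range_zero, List.map_nil]
    rw [List.filter_eq_self.mpr]
    intro p hp
    have hmem := (PySem.List.sorted2_perm _ _ _ false).subset hp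
    obtain ⟨h1, h2, h3⟩ := mem_pairs0 cs ring_order p hmem
    have := hnn p.2 h1 h2
    simp only [decide_eq_true_eq]
    omega
  | succ k ih =>
    have hsplit : PySem.List.pyRange 0 ((k + 1 : Nat) : Int) 1 =
        PySem.List.pyRange 0 (k : Int) 1 ++ [(k : Int)] := by
      push_cast
      exact PySem.List.pyRange_one_succ_right (by positivity)
    rw [hsplit]
    simp only [List.foldl_append, List.foldl_cons, List.foldl_nil]
    rw [ih (by omega)]
    have hpw : (S.filter (fun p => decide ((k : Int) ≤ p.1))).Pairwise pvLexLt :=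
      (sorted_pairs_lex cs ring_order).filter _
    rw [pvMerge_spec (k : Int) _ (k : Int) hpw]
    refine Prod.ext ?_ ?_
    · simp only
      rw [sel_eq cs ring_order k, List.range_succ, List.map_append, List.map_cons, List.map_nil]
    · simp only
      rw [List.filter_filter]
      exact List.filter_congr (fun p _ => by
        by_cases h : ((k : Int) + 1) ≤ p.1
        · rw [decide_eq_true (show ((k + 1 : Nat) : Int) ≤ p.1 by push_cast; omega)]
          simp only [Bool.and_eq_true, decide_eq_true_eq]
          omega
        · rw [decide_eq_false (show ¬ ((k + 1 : Nat) : Int) ≤ p.1 by push_cast; omega)]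
          simp only [Bool.and_eq_false_iff, decide_eq_false_iff_not]
          omega)

-- ===== VERDICT (by name: the statement is the Claim_ definition above) =====
theorem apply_custom_ring_spec : Claim_equal_apply_custom_ring := by
  intro text ring_order hDom hPre
  obtain ⟨hlen, hpos⟩ := hPre
  show apply_custom_ring text ring_order = apply_custom_ring_alt text ring_order
  have hnn : ∀ i : Int, 0 ≤ i → i < (text.toList.length : Int) →
      0 ≤ PySem.List.pyGetD ring_order (PySem.Int.mod i 24) 0 + PySem.Int.floordiv i 24 * 24 := by
    intro i h0 hi
    have hm : PySem.Int.mod i 24 = i % 24 := PySem.Int.mod_eq_emod_of_pos (by omega)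
    have hd : PySem.Int.floordiv i 24 = i / 24 := PySem.Int.floordiv_eq_ediv_of_pos (by omega)
    have hb : 0 ≤ i % 24 ∧ i % 24 < 24 ∧ i % 24 ≤ i := by omega
    have hget : PySem.List.pyGetD ring_order (PySem.Int.mod i 24) 0 =
        ring_order.getD (PySem.Int.mod i 24).toNat 0 :=
      PySem.List.pyGetD_of_nonneg _ _ (by omega)
    have hidx : (PySem.Int.mod i 24).toNat < min text.toList.length 24 := by omega
    have := hpos _ hidx
    rw [hget]
    have : (0 : Int) ≤ i / 24 * 24 := by positivity
    omega
  unfold apply_custom_ring apply_custom_ring_alt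
  simp only
  rw [a_eval text.toList ring_order hnn,
    merge_inv text.toList ring_order hnn text.toList.length le_rfl]
  rfl
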